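-- pv_equiv track=rewrite | github.com/Vladick102/BiasedLM | scrapers_en/ukrinform_en.py | clean_text_lines
-- ===== SOURCE A (Python) =====
-- def clean_text_lines(lines: list[str]) -> str:
--     filtered: list[str] = []
--     skip_exact = {
--         "Ukrinform",
--         "Image",
--         "photos",
--         "video",
--         "Exclusive",
--     }
--
--     for raw in lines:
--         line = raw.strip()
--         if not line:
--             continue
--         if line in skip_exact:
--             continue
--         if line.startswith("Read also:"):
--             continue
--         if line.startswith("Photo:"):
--             continue
--         if line.startswith("Topics"):
--             break
--         if line.startswith("Agency"):
--             break
--         if line.startswith("While citing and using any materials"):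
--             break
--         filtered.append(line)
--
--     return "\n".join(filtered).strip()
-- ===== SOURCE B (Python) =====
-- def clean_text_lines(lines: list[str]) -> str:
--     skip_exact = {"Ukrinform", "Image", "photos", "video", "Exclusive"}
--     break_prefixes = ("Topics", "Agency", "While citing and using any materials")
--     cut = next((i for i, raw in enumerate(lines)
--                 if raw.strip().startswith(break_prefixes)), len(lines))
--     kept = [line for line in map(str.strip, lines[:cut])
--             if line and line not in skip_exact
--             and not line.startswith(("Read also:", "Photo:"))]
--     return "\n".join(kept).strip()
-- ===== Notes on version B (the rewrite author's own statement) =====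
-- stated objective: alternative
-- what changed: A's single loop with mid-loop break is replaced by first locating the truncation boundary (index of the first line whose stripped form starts with a break prefix), then filtering the stripped prefix with a comprehension and joining.
import Mathlib
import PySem

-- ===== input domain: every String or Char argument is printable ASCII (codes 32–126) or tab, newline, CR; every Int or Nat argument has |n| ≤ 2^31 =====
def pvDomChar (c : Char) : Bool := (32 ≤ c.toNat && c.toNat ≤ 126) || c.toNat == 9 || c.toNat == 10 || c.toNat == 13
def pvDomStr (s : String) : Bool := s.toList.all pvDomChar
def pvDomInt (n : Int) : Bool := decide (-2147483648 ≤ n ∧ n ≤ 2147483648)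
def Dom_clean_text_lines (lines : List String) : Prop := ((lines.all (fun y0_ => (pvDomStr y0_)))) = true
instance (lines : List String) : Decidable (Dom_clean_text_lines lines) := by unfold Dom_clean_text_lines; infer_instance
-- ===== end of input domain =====

-- B replaces A's single break-bearing loop by a boundary-finding pass (index of the
-- first break line) followed by a filtering comprehension over the prefix (objective: alternative decomposition).

-- ===== PORT A =====
def skipExactA : PySem.Set String :=
  PySem.Set.ofList ["Ukrinform", "Image", "photos", "video", "Exclusive"]

def cleanLoopA : List String → List String → List String
  | [], filtered => filtered
  | raw :: rest, filtered =>
    let line := PySem.Str.strip raw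
    if line == "" then cleanLoopA rest filtered
    else if PySem.Set.contains skipExactA line then cleanLoopA rest filtered
    else if PySem.Str.startswith line "Read also:" then cleanLoopA rest filtered
    else if PySem.Str.startswith line "Photo:" then cleanLoopA rest filtered
    else if PySem.Str.startswith line "Topics" then filtered
    else if PySem.Str.startswith line "Agency" then filtered
    else if PySem.Str.startswith line "While citing and using any materials" then filtered
    else cleanLoopA rest (filtered ++ [line])

def clean_text_lines (lines : List String) : String :=
  PySem.Str.strip (PySem.Str.join "\n" (cleanLoopA lines []))

-- ===== PORT B =====
def skipExactB : PySem.Set String :=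
  PySem.Set.ofList ["Ukrinform", "Image", "photos", "video", "Exclusive"]

def breakPredB (raw : String) : Bool :=
  PySem.Str.startswith (PySem.Str.strip raw) "Topics"
    || PySem.Str.startswith (PySem.Str.strip raw) "Agency"
    || PySem.Str.startswith (PySem.Str.strip raw) "While citing and using any materials"

def keepB (line : String) : Bool :=
  !(line == "") && !(PySem.Set.contains skipExactB line)
    && !(PySem.Str.startswith line "Read also:" || PySem.Str.startswith line "Photo:")

def clean_text_lines_alt (lines : List String) : String :=
  let cut := List.findIdx breakPredB lines
  let kept := ((lines.take cut).map PySem.Str.strip).filter keepB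
  PySem.Str.strip (PySem.Str.join "\n" kept)

-- ===== PRECONDITION & SPEC =====
def Spec_clean_text_lines (lines : List String) (out : String) : Prop := out = clean_text_lines_alt lines
instance (lines : List String) (out : String) : Decidable (Spec_clean_text_lines lines out) := by unfold Spec_clean_text_lines; infer_instance

-- ===== CLAIM (what is proved, stated in full; the proofs are below) =====
def Claim_equal_clean_text_lines : Prop := ∀ (lines : List String), Dom_clean_text_lines lines → Spec_clean_text_lines lines (clean_text_lines lines)

-- ===== LEMMAS AND PROOFS =====

-- a line starting with a nonempty prefix has that prefix's first char first
theorem head_of_startswith (s p : String) (c : Char) (hc : p.toList.head? = some c)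
    (h : PySem.Str.startswith s p = true) : s.toList.head? = some c := by
  rw [PySem.Str.startswith_eq] at h
  rcases (PySem.Chars.startswith_iff _ _).mp h with ⟨t, ht⟩
  cases hp : p.toList with
  | nil => simp [hp] at hc
  | cons a as =>
    rw [hp] at hc ht
    simp at hc
    simp [← ht, hc]

-- a line on which A breaks fails each of A's four skip tests
theorem break_no_skip (line : String)
    (h : PySem.Str.startswith line "Topics" = true ∨ PySem.Str.startswith line "Agency" = true
        ∨ PySem.Str.startswith line "While citing and using any materials" = true) :
    (line == "") = false ∧ PySem.Set.contains skipExactA line = false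
      ∧ PySem.Str.startswith line "Read also:" = false
      ∧ PySem.Str.startswith line "Photo:" = false := by
  have hc : line.toList.head? = some 'T' ∨ line.toList.head? = some 'A'
      ∨ line.toList.head? = some 'W' := by
    rcases h with h | h | h
    · exact Or.inl (head_of_startswith _ _ _ (by decide) h)
    · exact Or.inr (Or.inl (head_of_startswith _ _ _ (by decide) h))
    · exact Or.inr (Or.inr (head_of_startswith _ _ _ (by decide) h))
  refine ⟨?_, ?_, ?_, ?_⟩
  · by_contra hne
    have : line = "" := by
      cases hq : (line == "") with
      | true => exact eq_of_beq hq
      | false => exact absurd hq hne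
    subst this
    rcases hc with h | h | h <;> simp at h
  · by_contra hne
    have hmem : line ∈ skipExactA := by
      cases hq : PySem.Set.contains skipExactA line with
      | true => exact (PySem.Set.contains_iff _ _).mp hq
      | false => exact absurd hq hne
    have : line = "Ukrinform" ∨ line = "Image" ∨ line = "photos" ∨ line = "video"
        ∨ line = "Exclusive" := by
      simpa [skipExactA, PySem.Set.mem_ofList] using hmem
    rcases this with h | h | h | h | h <;> subst h <;> rcases hc with h | h | h <;> simp_all
  · by_contra hne
    have h' : PySem.Str.startswith line "Read also:" = true := by
      cases hq : PySem.Str.startswith line "Read also:" with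
      | true => rfl
      | false => exact absurd hq hne
    have := head_of_startswith _ _ 'R' (by decide) h'
    rcases hc with h | h | h <;> simp_all
  · by_contra hne
    have h' : PySem.Str.startswith line "Photo:" = true := by
      cases hq : PySem.Str.startswith line "Photo:" with
      | true => rfl
      | false => exact absurd hq hne
    have := head_of_startswith _ _ 'P' (by decide) h'
    rcases hc with h | h | h <;> simp_all

theorem cleanLoopA_eq (lines : List String) (acc : List String) :
    cleanLoopA lines acc =
      acc ++ ((lines.take (List.findIdx breakPredB lines)).map PySem.Str.strip).filter keepB := by
  induction lines generalizing acc with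
  | nil => simp [cleanLoopA]
  | cons raw rest ih =>
    by_cases hb : breakPredB raw = true
    · have hor := hb
      simp only [breakPredB, Bool.or_eq_true] at hor
      have hf : List.findIdx breakPredB (raw :: rest) = 0 := by
        simp [List.findIdx_cons, hb]
      rw [hf]
      have main : ∀ h : PySem.Str.startswith (PySem.Str.strip raw) "Topics" = true
          ∨ PySem.Str.startswith (PySem.Str.strip raw) "Agency" = true
          ∨ PySem.Str.startswith (PySem.Str.strip raw) "While citing and using any materials" = true,
          cleanLoopA (raw :: rest) acc =
            acc ++ List.filter keepB (List.map PySem.Str.strip (List.take 0 (raw :: rest))) := by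
        intro h
        obtain ⟨h1, h2, h3, h4⟩ := break_no_skip _ h
        have h2' : PySem.Str.strip raw ∉ skipExactA := by
          intro hm
          rw [(PySem.Set.contains_iff _ _).mpr hm] at h2
          cases h2
        simp at h3 h4
        rcases h with h | h | h <;> simp at h <;>
          simp [cleanLoopA, h1, h2', h3, h4, h]
      rcases hor with (h | h) | h
      · exact main (Or.inl h)
      · exact main (Or.inr (Or.inl h))
      · exact main (Or.inr (Or.inr h))
    · have hbf : breakPredB raw = false := by simpa using hb
      have hf : List.findIdx breakPredB (raw :: rest) = List.findIdx breakPredB rest + 1 := by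
        simp [List.findIdx_cons, hbf]
      have hor := hbf
      simp only [breakPredB, Bool.or_eq_false_iff] at hor
      obtain ⟨⟨ht, ha⟩, hw⟩ := hor
      simp at ht ha hw
      rw [hf, List.take_succ_cons]
      by_cases he : (PySem.Str.strip raw == "") = true
      · simp [cleanLoopA, he, keepB, ih]
      · have he' : (PySem.Str.strip raw == "") = false := by simpa using he
        by_cases hs : PySem.Set.contains skipExactA (PySem.Str.strip raw) = true
        · have hmA : PySem.Str.strip raw ∈ skipExactA := (PySem.Set.contains_iff _ _).mp hs
          have hmB : PySem.Str.strip raw ∈ skipExactB := hmA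
          simp [cleanLoopA, he', hmA, hmB, keepB, ih]
        · have hmA : PySem.Str.strip raw ∉ skipExactA := fun hm => hs ((PySem.Set.contains_iff _ _).mpr hm)
          have hmB : PySem.Str.strip raw ∉ skipExactB := hmA
          by_cases hr : PySem.Str.startswith (PySem.Str.strip raw) "Read also:" = true
          · have hrC := hr; simp at hrC
            simp [cleanLoopA, he', hmA, hmB, hrC, keepB, ih]
          · have hr' : PySem.Str.startswith (PySem.Str.strip raw) "Read also:" = false := by simpa using hr
            have hrC := hr'; simp at hrC
            by_cases hp : PySem.Str.startswith (PySem.Str.strip raw) "Photo:" = true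
            · have hpC := hp; simp at hpC
              simp [cleanLoopA, he', hmA, hmB, hrC, hpC, keepB, ih]
            · have hp' : PySem.Str.startswith (PySem.Str.strip raw) "Photo:" = false := by simpa using hp
              have hpC := hp'; simp at hpC
              simp [cleanLoopA, he', hmA, hmB, hrC, hpC, ht, ha, hw, keepB, ih]

-- ===== VERDICT (by name: the statement is the Claim_ definition above) =====
theorem clean_text_lines_spec : Claim_equal_clean_text_lines := by
  intro lines _
  unfold Spec_clean_text_lines clean_text_lines clean_text_lines_alt
  rw [cleanLoopA_eq]
  simp
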